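-- pv_equiv track=rewrite | github.com/ansalr/python | V2e/task1/cs6.py | calc
-- ===== SOURCE A (Python) =====
-- def calc(l):
--     nl=[]
--     for i in l:
--         if i<=144:
--             return nl
--         else:
--             if i>1200:
--                 pass
--             else:
--                 if i%12==0:
--                     nl.append(i)
--     return nl
-- ===== SOURCE B (Python) =====
-- def calc(l):
--     # Pass 1: locate the cut point (index of the first element <= 144, else len(l)).
--     k = len(l)
--     for j, v in enumerate(l):
--         if v <= 144:
--             k = j
--             break
--     # Pass 2: walk the prefix BACKWARDS, collecting kept elements, then reverse once.
--     out = []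
--     for v in reversed(l[:k]):
--         if v <= 1200 and v % 12 == 0:
--             out.append(v)
--     out.reverse()
--     return out
-- ===== Notes on version B (the rewrite author's own statement) =====
-- stated objective: alternative
-- what changed: Replaces A's fused single pass (accumulator + early return inside nested if/pass) by two staged passes: an index search for the cut point at the first element <= 144, then a backward traversal of that prefix collecting kept multiples of 12 and one final reverse to restore order.
import Mathlib
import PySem

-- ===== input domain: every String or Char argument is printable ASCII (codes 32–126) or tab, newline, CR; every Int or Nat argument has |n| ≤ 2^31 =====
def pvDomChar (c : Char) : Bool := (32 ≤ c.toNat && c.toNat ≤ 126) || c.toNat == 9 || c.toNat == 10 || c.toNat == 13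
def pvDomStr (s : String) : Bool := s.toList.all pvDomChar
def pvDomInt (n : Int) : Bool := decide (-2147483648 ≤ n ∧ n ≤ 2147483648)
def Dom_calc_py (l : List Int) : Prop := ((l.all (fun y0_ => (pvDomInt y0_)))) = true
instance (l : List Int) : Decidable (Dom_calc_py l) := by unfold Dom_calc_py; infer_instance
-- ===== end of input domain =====

-- B returns the same value via a different decomposition: a cut-point search pass, then a
-- backward collection over the prefix with one final reverse (same O(n) cost).

-- ===== PORT A =====
-- A's loop: accumulator nl, early return at the first i ≤ 144.
def calcGo : List Int → List Int → List Int
  | [], nl => nl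
  | i :: rest, nl =>
    if i ≤ 144 then nl
    else if i > 1200 then calcGo rest nl
    else if PySem.Int.mod i 12 = 0 then calcGo rest (nl ++ [i])
    else calcGo rest nl

def calc_py (l : List Int) : List Int := calcGo l []

-- ===== PORT B =====
-- B pass 1: index of the first element ≤ 144, else the length (enumerate + break).
def calcCut : List Int → Nat
  | [] => 0
  | v :: rest => if v ≤ 144 then 0 else 1 + calcCut rest

-- B pass 2: backward walk over the prefix appending kept elements, then one reverse.
def calc_py_alt (l : List Int) : List Int :=
  ((l.take (calcCut l)).reverse.foldl
      (fun out v => if v ≤ 1200 ∧ PySem.Int.mod v 12 = 0 then out ++ [v] else out)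
      []).reverse

-- ===== PRECONDITION & SPEC =====
def Spec_calc_py (l : List Int) (out : List Int) : Prop := out = calc_py_alt l
instance (l : List Int) (out : List Int) : Decidable (Spec_calc_py l out) := by unfold Spec_calc_py; infer_instance

-- ===== CLAIM (what is proved, stated in full; the proofs are below) =====
def Claim_equal_calc_py : Prop := ∀ (l : List Int), Dom_calc_py l → Spec_calc_py l (calc_py l)

-- ===== LEMMAS AND PROOFS =====
-- Reference function both ports are reduced to.
def calcRef : List Int → List Int
  | [] => []
  | i :: rest =>
    if i ≤ 144 then []
    else if i ≤ 1200 ∧ PySem.Int.mod i 12 = 0 then i :: calcRef rest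
    else calcRef rest

theorem calcGo_eq (l : List Int) : ∀ nl : List Int, calcGo l nl = nl ++ calcRef l := by
  induction l with
  | nil => intro nl; simp [calcGo, calcRef]
  | cons i rest ih =>
    intro nl
    by_cases h1 : i ≤ 144
    · simp [calcGo, calcRef, h1]
    · by_cases h2 : i > 1200
      · simp [calcGo, calcRef, h1, h2, ih nl]
      · by_cases h3 : (12 : Int) ∣ i
        · simp [calcGo, calcRef, h1, h2, h3, show i ≤ 1200 by omega, ih (nl ++ [i])]
        · simp [calcGo, calcRef, h1, h2, h3, ih nl]

theorem foldl_app_filter (xs : List Int) (p : Int → Prop) [DecidablePred p] :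
    ∀ acc : List Int,
      xs.foldl (fun out v => if p v then out ++ [v] else out) acc = acc ++ xs.filter (fun v => decide (p v)) := by
  induction xs with
  | nil => intro acc; simp
  | cons x xs ih =>
    intro acc
    by_cases h : p x <;> simp [List.foldl, h, ih, List.filter]

theorem take_cut (l : List Int) :
    l.take (calcCut l) = l.takeWhile (fun v => decide (¬ v ≤ 144)) := by
  induction l with
  | nil => simp [calcCut]
  | cons v rest ih =>
    by_cases h : v ≤ 144
    · simp [calcCut, h, List.takeWhile]
    · simp [calcCut, h, List.takeWhile, Nat.add_comm, ih]

theorem ref_eq (l : List Int) :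
    calcRef l = (l.takeWhile (fun v => decide (¬ v ≤ 144))).filter
      (fun v => decide (v ≤ 1200 ∧ PySem.Int.mod v 12 = 0)) := by
  induction l with
  | nil => simp [calcRef]
  | cons i rest ih =>
    by_cases h1 : i ≤ 144
    · simp [calcRef, h1, List.takeWhile]
    · by_cases h2a : i ≤ 1200 <;> by_cases h2b : (12 : Int) ∣ i <;>
        simp [calcRef, h1, h2a, h2b, List.takeWhile, ih]

-- ===== VERDICT (by name: the statement is the Claim_ definition above) =====
theorem calc_py_spec : Claim_equal_calc_py := by
  intro l _
  unfold Spec_calc_py calc_py calc_py_alt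
  rw [calcGo_eq l [], foldl_app_filter _ (fun v => v ≤ 1200 ∧ PySem.Int.mod v 12 = 0) []]
  simp [take_cut, ref_eq]
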